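-- pv_equiv track=rewrite | github.com/vlcak27/agentbom | src/agentbom/mermaid.py | _capability_keys_by_path
-- ===== SOURCE A (Python) =====
-- def _capability_keys_by_path(capabilities: object) -> dict[str, list[str]]:
--     keys_by_path: dict[str, list[str]] = {}
--     if not isinstance(capabilities, list):
--         return keys_by_path
--     for capability in capabilities:
--         if not isinstance(capability, dict):
--             continue
--         path = str(capability.get("path", ""))
--         name = str(capability.get("name", "unknown"))
--         if path:
--             keys_by_path.setdefault(path, [])
--             _append_unique(keys_by_path[path], f"capability:{name}")
--     return keys_by_path
--
-- def _append_unique(items: list[str], item: str) -> None: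
--     if item not in items:
--         items.append(item)
-- ===== SOURCE B (Python) =====
-- def _capability_keys_by_path(capabilities: object) -> dict[str, list[str]]:
--     if not isinstance(capabilities, list):
--         return {}
--     pairs = [
--         (str(c.get("path", "")), "capability:" + str(c.get("name", "unknown")))
--         for c in capabilities
--         if isinstance(c, dict) and str(c.get("path", ""))
--     ]
--     paths = list(dict.fromkeys(p for p, _ in pairs))
--     return {
--         p: list(dict.fromkeys(k for q, k in pairs if q == p))
--         for p in paths
--     }
-- ===== Notes on version B (the rewrite author's own statement) =====
-- stated objective: alternative
-- what changed: B replaces A's incremental dict building (setdefault + in-place unique append per element) with a flatten-then-group pipeline: it first extracts the flat list of (path, key) pairs with a comprehension, then computes the distinct paths in first-occurrence order, and builds the result with a dict comprehension that, per path, filters the pair list and deduplicates via dict.fromkeys.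
import Mathlib
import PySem

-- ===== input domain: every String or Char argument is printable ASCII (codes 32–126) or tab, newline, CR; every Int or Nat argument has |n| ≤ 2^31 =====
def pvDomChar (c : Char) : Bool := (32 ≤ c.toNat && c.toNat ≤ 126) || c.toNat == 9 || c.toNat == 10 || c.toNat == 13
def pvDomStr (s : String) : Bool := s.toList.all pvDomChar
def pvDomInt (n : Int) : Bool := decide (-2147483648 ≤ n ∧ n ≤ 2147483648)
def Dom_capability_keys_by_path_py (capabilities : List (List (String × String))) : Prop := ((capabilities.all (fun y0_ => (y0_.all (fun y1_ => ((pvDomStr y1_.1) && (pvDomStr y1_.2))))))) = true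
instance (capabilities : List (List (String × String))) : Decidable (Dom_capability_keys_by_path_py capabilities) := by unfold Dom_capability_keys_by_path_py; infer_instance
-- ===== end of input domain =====

-- B re-decomposes A's incremental dict build into a flatten-then-group pipeline (pair extraction, distinct paths, per-path filter + ordered dedup); same result, similar cost.


-- ===== PORT A =====
-- _append_unique: append item only if not already present
def capAppendUnique (items : List String) (item : String) : List String :=
  if items.contains item then items else items ++ [item]

-- Port of A. Under the type convention 'capabilities : List (List (String × String))'
-- every element IS a dict and the argument IS a list, so the two isinstance guards are
-- identically true and str() on a str is the identity; the rest is step for step.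
def capability_keys_by_path_py (capabilities : List (List (String × String))) : List (String × List String) :=
  (capabilities.foldl
    (fun keys_by_path capability =>
      let path := PySem.Dict.getD (PySem.Dict.mk capability) "path" ""
      let name := PySem.Dict.getD (PySem.Dict.mk capability) "name" "unknown"
      if path ≠ "" then
        let d := PySem.Dict.setdefault keys_by_path path []
        PySem.Dict.insert d path (capAppendUnique (PySem.Dict.getD d path []) ("capability:" ++ name))
      else keys_by_path)
    PySem.Dict.empty).items

-- ===== PORT B =====
-- Port of B: comprehension extracting (path, key) pairs, then the distinct paths in
-- first-occurrence order (dict.fromkeys = PySem.List.dedup), then a dict comprehension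
-- grouping by per-path filter with ordered dedup of the keys.
def capability_keys_by_path_py_alt (capabilities : List (List (String × String))) : List (String × List String) :=
  let pairs := capabilities.filterMap (fun c =>
    let path := PySem.Dict.getD (PySem.Dict.mk c) "path" ""
    if path ≠ "" then
      some (path, "capability:" ++ PySem.Dict.getD (PySem.Dict.mk c) "name" "unknown")
    else none)
  let paths := PySem.List.dedup (pairs.map Prod.fst)
  paths.map (fun p =>
    (p, PySem.List.dedup ((pairs.filter (fun q => q.1 == p)).map Prod.snd)))

-- ===== PRECONDITION & SPEC =====
def Spec_capability_keys_by_path_py (capabilities : List (List (String × String))) (out : List (String × List String)) : Prop := out = capability_keys_by_path_py_alt capabilities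
instance (capabilities : List (List (String × String))) (out : List (String × List String)) : Decidable (Spec_capability_keys_by_path_py capabilities out) := by unfold Spec_capability_keys_by_path_py; infer_instance

-- ===== CLAIM (what is proved, stated in full; the proofs are below) =====
def Claim_equal_capability_keys_by_path_py : Prop := ∀ (capabilities : List (List (String × String))), Dom_capability_keys_by_path_py capabilities → Spec_capability_keys_by_path_py capabilities (capability_keys_by_path_py capabilities)

-- ===== LEMMAS AND PROOFS =====

-- group a flat pair list the way B does
def capGroup (ps : List (String × String)) : List (String × List String) :=
  (PySem.List.dedup (ps.map Prod.fst)).map (fun p =>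
    (p, PySem.List.dedup ((ps.filter (fun q => q.1 == p)).map Prod.snd)))

theorem cap_dedup_append (l : List String) (x : String) :
    PySem.List.dedup (l ++ [x]) = capAppendUnique (PySem.List.dedup l) x := by
  simp [PySem.List.dedup, PySem.Set.ofList, capAppendUnique, PySem.Set.add, PySem.Set.contains,
    List.foldl_append]

theorem cap_get?_graph (ks : List String) (f : String → List String) (p : String) :
    (PySem.Dict.mk (ks.map (fun k => (k, f k)))).get? p
      = if p ∈ ks then some (f p) else none := by
  induction ks with
  | nil => simp [PySem.Dict.get?]
  | cons k t ih =>
    by_cases h : k = p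
    · subst h; simp [PySem.Dict.get?_mk_cons]
    · simp [PySem.Dict.get?_mk_cons, h, ih, Ne.symm h]

theorem cap_contains_graph (ks : List String) (f : String → List String) (p : String) :
    (PySem.Dict.mk (ks.map (fun k => (k, f k)))).contains p = decide (p ∈ ks) := by
  rw [PySem.Dict.contains_eq_decide_mem_keys]
  simp [PySem.Dict.keys, List.map_map, Function.comp_def]

theorem cap_group_step (done : List (String × String)) (p k : String) :
    (((PySem.Dict.mk (capGroup done)).setdefault p []).insert p
        (capAppendUnique (((PySem.Dict.mk (capGroup done)).setdefault p []).getD p []) k)).items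
      = capGroup (done ++ [(p, k)]) := by
  have hkeys : PySem.List.dedup ((done ++ [(p, k)]).map Prod.fst)
      = capAppendUnique (PySem.List.dedup (done.map Prod.fst)) p := by
    simpa using cap_dedup_append (done.map Prod.fst) p
  have hfe : ∀ q, q ≠ p →
      ((done ++ [(p, k)]).filter (fun x => x.1 == q)) = done.filter (fun x => x.1 == q) := by
    intro q hq
    simp [List.filter_append, Ne.symm hq]
  have hfp : ((done ++ [(p, k)]).filter (fun x => x.1 == p))
      = done.filter (fun x => x.1 == p) ++ [(p, k)] := by
    simp [List.filter_append]
  by_cases hmem : p ∈ done.map Prod.fst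
  · -- p already a key: setdefault is a no-op, insert rewrites the existing entry
    have hc : (PySem.Dict.mk (capGroup done)).contains p = true := by
      rw [capGroup, cap_contains_graph]; simpa [PySem.List.mem_dedup] using hmem
    have hsd : (PySem.Dict.mk (capGroup done)).setdefault p [] = PySem.Dict.mk (capGroup done) := by
      simp [PySem.Dict.setdefault, hc]
    rw [hsd]
    have hget : (PySem.Dict.mk (capGroup done)).getD p []
        = PySem.List.dedup ((done.filter (fun q => q.1 == p)).map Prod.snd) := by
      rw [PySem.Dict.getD_eq_get?_getD, capGroup, cap_get?_graph]
      simp [hmem]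
    rw [hget, PySem.Dict.items_insert_of_contains _ _ hc]
    show (capGroup done).map _ = capGroup (done ++ [(p, k)])
    rw [capGroup, capGroup, hkeys, List.map_map]
    have hkeq : capAppendUnique (PySem.List.dedup (done.map Prod.fst)) p
        = PySem.List.dedup (done.map Prod.fst) := by
      simp [capAppendUnique, hmem]
    rw [hkeq]
    refine List.map_congr_left (fun q _ => ?_)
    by_cases hq : q = p
    · subst hq
      simp [Function.comp, hfp]
      exact (cap_dedup_append _ k).symm
    · simp [Function.comp, hq, hfe q hq]
  · -- p is a fresh key: setdefault appends (p, []), insert then fills in [k]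
    have hc : (PySem.Dict.mk (capGroup done)).contains p = false := by
      rw [capGroup, cap_contains_graph]; simpa [PySem.List.mem_dedup] using hmem
    have hsd : ((PySem.Dict.mk (capGroup done)).setdefault p []).items
        = capGroup done ++ [(p, [])] := by
      simp [PySem.Dict.setdefault, hc]
    have hsd' : (PySem.Dict.mk (capGroup done)).setdefault p []
        = PySem.Dict.mk (capGroup done ++ [(p, [])]) := PySem.Dict.ext hsd
    rw [hsd']
    have hc2 : (PySem.Dict.mk (capGroup done ++ [(p, [])])).contains p = true := by
      simp [PySem.Dict.contains]
    have hget : (PySem.Dict.mk (capGroup done ++ [(p, [])])).getD p [] = [] := by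
      rw [PySem.Dict.getD_eq_get?_getD]
      have : (PySem.Dict.mk ((PySem.List.dedup (done.map Prod.fst) ++ [p]).map
          (fun q => (q, if q = p then [] else
            PySem.List.dedup ((done.filter (fun x => x.1 == q)).map Prod.snd))))).get? p
          = some [] := by
        rw [cap_get?_graph]; simp
      have hrw : capGroup done ++ [(p, [])]
          = (PySem.List.dedup (done.map Prod.fst) ++ [p]).map
            (fun q => (q, if q = p then [] else
              PySem.List.dedup ((done.filter (fun x => x.1 == q)).map Prod.snd))) := by
        rw [capGroup]
        simp only [List.map_append, List.map_cons, List.map_nil]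
        congr 1
        refine (List.map_congr_left (fun q hqmem => ?_))
        have hq : q ≠ p := by
          intro h; exact hmem (by simpa [PySem.List.mem_dedup, h] using hqmem)
        simp [hq]
      rw [hrw, this]; rfl
    rw [hget]
    have hk : capAppendUnique [] k = [k] := by simp [capAppendUnique]
    rw [hk, PySem.Dict.items_insert_of_contains _ _ hc2]
    show (capGroup done ++ [(p, [])]).map _ = capGroup (done ++ [(p, k)])
    rw [List.map_append, capGroup, capGroup, hkeys]
    have hkeq : capAppendUnique (PySem.List.dedup (done.map Prod.fst)) p
        = PySem.List.dedup (done.map Prod.fst) ++ [p] := by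
      simp [capAppendUnique, hmem]
    rw [hkeq, List.map_append, List.map_map]
    congr 1
    · refine List.map_congr_left (fun q hqmem => ?_)
      have hq : q ≠ p := by
        intro h; exact hmem (by simpa [PySem.List.mem_dedup, h] using hqmem)
      simp [Function.comp, hq, hfe q hq]
    · have hnil : done.filter (fun q => q.1 == p) = [] := by
        rw [List.filter_eq_nil_iff]
        intro a ha hb
        exact hmem (List.mem_map.mpr ⟨a, ha, by simpa using hb⟩)
      simp [hnil, PySem.List.dedup, PySem.Set.ofList, PySem.Set.add, PySem.Set.contains,
        PySem.Set.empty]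

theorem cap_fold_group (capabilities : List (List (String × String)))
    (done : List (String × String)) :
    (capabilities.foldl
      (fun keys_by_path capability =>
        let path := PySem.Dict.getD (PySem.Dict.mk capability) "path" ""
        let name := PySem.Dict.getD (PySem.Dict.mk capability) "name" "unknown"
        if path ≠ "" then
          let d := PySem.Dict.setdefault keys_by_path path []
          PySem.Dict.insert d path (capAppendUnique (PySem.Dict.getD d path []) ("capability:" ++ name))
        else keys_by_path)
      (PySem.Dict.mk (capGroup done))).items
    = capGroup (done ++ capabilities.filterMap (fun c =>
        let path := PySem.Dict.getD (PySem.Dict.mk c) "path" ""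
        if path ≠ "" then
          some (path, "capability:" ++ PySem.Dict.getD (PySem.Dict.mk c) "name" "unknown")
        else none)) := by
  induction capabilities generalizing done with
  | nil => simp
  | cons c t ih =>
    simp only [List.foldl_cons, List.filterMap_cons]
    by_cases hp : PySem.Dict.getD (PySem.Dict.mk c) "path" "" ≠ ""
    · set path := PySem.Dict.getD (PySem.Dict.mk c) "path" ""
      set key := "capability:" ++ PySem.Dict.getD (PySem.Dict.mk c) "name" "unknown"
      simp only [if_pos hp]
      have hstep := cap_group_step done path key
      have hD : ((PySem.Dict.mk (capGroup done)).setdefault path []).insert path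
          (capAppendUnique (((PySem.Dict.mk (capGroup done)).setdefault path []).getD path []) key)
          = PySem.Dict.mk (capGroup (done ++ [(path, key)])) := PySem.Dict.ext hstep
      rw [hD, ih (done ++ [(path, key)])]
      simp
    · simp only [if_neg hp]
      exact ih done

-- ===== VERDICT (by name: the statement is the Claim_ definition above) =====
theorem capability_keys_by_path_py_spec : Claim_equal_capability_keys_by_path_py := by
  intro capabilities _
  unfold Spec_capability_keys_by_path_py capability_keys_by_path_py capability_keys_by_path_py_alt
  have h := cap_fold_group capabilities []
  simpa [capGroup, PySem.Dict.empty] using h
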